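-- pv_equiv track=rewrite | github.com/mrqht9/Moj-Agentic-AI | app/x/loginx2026/x_auth/castle.py | arr_to_16bits
-- ===== SOURCE A (Python) =====
-- def arr_to_16bits(arr):
--     bits = list(map(lambda x: int(bool(x)), arr[:16]))
--     if len(bits) < 16:
--         bits += [0] * (16 - len(bits))
--     value = 0
--     for bit in bits:
--         value = (value << 1) | bit
--     return value
-- ===== SOURCE B (Python) =====
-- def arr_to_16bits(arr):
--     return sum(32768 >> i for i, x in enumerate(arr[:16]) if x)
-- ===== Notes on version B (the rewrite author's own statement) =====
-- stated objective: simpler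
-- what changed: Replaces the padded 0/1 list plus shift-and-or accumulator loop with a one-line sum of fixed positional weights 32768 >> i over the truthy entries of arr[:16]; no padding and no running accumulator transformation is needed.
import Mathlib
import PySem

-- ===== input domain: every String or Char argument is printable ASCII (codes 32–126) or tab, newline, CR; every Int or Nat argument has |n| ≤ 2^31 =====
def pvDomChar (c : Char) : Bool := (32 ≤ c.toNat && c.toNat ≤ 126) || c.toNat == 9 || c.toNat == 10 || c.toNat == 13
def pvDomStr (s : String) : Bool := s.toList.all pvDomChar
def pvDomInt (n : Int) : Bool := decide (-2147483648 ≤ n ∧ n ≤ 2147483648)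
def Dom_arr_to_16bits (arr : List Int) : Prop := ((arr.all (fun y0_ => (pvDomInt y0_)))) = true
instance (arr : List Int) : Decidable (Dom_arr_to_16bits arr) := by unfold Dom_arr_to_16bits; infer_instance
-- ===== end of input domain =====

-- B replaces A's padded 0/1 list and shift-and-or accumulator loop by a plain sum of
-- fixed positional weights 32768 >> i over the truthy entries of arr[:16] (simpler; same cost).

-- ===== PORT A =====
-- bits = list(map(lambda x: int(bool(x)), arr[:16])); pad with zeros to length 16; then
-- value = 0; for bit in bits: value = (value << 1) | bit
def arr_to_16bits (arr : List Int) : Int :=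
  let bits0 : List Int := (PySem.List.slice arr none (some 16)).map (fun x => if x ≠ 0 then 1 else 0)
  let bits : List Int :=
    if bits0.length < 16 then bits0 ++ List.replicate (16 - bits0.length) 0 else bits0
  bits.foldl (fun (value : Int) (bit : Int) => PySem.Int.bor (value <<< (1 : Nat)) bit) 0

-- ===== PORT B =====
-- return sum(32768 >> i for i, x in enumerate(arr[:16]) if x)
-- p.1 comes from enumerate(…, 0), hence p.1 ≥ 0 and `.toNat` is exact for Python's `32768 >> i`
def arr_to_16bits_alt (arr : List Int) : Int :=
  (PySem.List.enumerate (PySem.List.slice arr none (some 16)) 0).foldl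
    (fun (acc : Int) (p : Int × Int) => if p.2 ≠ 0 then acc + ((32768 : Int) >>> p.1.toNat) else acc) 0

-- ===== PRECONDITION & SPEC =====
def Spec_arr_to_16bits (arr : List Int) (out : Int) : Prop := out = arr_to_16bits_alt arr
instance (arr : List Int) (out : Int) : Decidable (Spec_arr_to_16bits arr out) := by unfold Spec_arr_to_16bits; infer_instance

-- ===== CLAIM (what is proved, stated in full; the proofs are below) =====
def Claim_equal_arr_to_16bits : Prop := ∀ (arr : List Int), Dom_arr_to_16bits arr → Spec_arr_to_16bits arr (arr_to_16bits arr)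

-- ===== LEMMAS AND PROOFS =====

-- A's loop step on a nonnegative accumulator and a 0/1 bit is "double and add the bit".
lemma stepA_cast (m : Nat) (b : Int) :
    PySem.Int.bor (((m : Nat) : Int) <<< (1 : Nat)) (if b ≠ 0 then (1:Int) else 0)
    = (((2*m + (if b ≠ 0 then 1 else 0) : Nat)) : Int) := by
  have hsh : ((m : Int) <<< (1 : Nat)) = ((m <<< 1 : Nat) : Int) := rfl
  rw [hsh, Nat.shiftLeft_eq]
  by_cases hb : b = 0
  · simp [hb, Nat.mul_comm]
  · simp only [ne_eq, hb, not_false_eq_true, if_true]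
    have h1 : PySem.Int.bor ((m * 2^1 : Nat) : Int) ((1:Nat) : Int) = (((m * 2^1) ||| 1 : Nat) : Int) :=
      PySem.Int.bor_natCast _ _
    have h2 : 2*m ||| 1 = 2*m+1 := by
      have h := Nat.bitwise_bit (f := or) (a := false) (m := m) (b := true) (n := 0)
      simp [Nat.bit] at h
      simpa [Nat.lor, two_mul, Nat.mul_comm] using h
    norm_num at h1 ⊢
    rw [Nat.mul_comm] at h1
    rw [h1, h2]
    push_cast; ring

lemma stepA_zero (m : Nat) :
    PySem.Int.bor (((m : Nat) : Int) <<< (1 : Nat)) (0 : Int) = (((2*m : Nat)) : Int) := by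
  have := stepA_cast m 0
  simpa using this

lemma shift_weight (k : Nat) (h : k ≤ 15) :
    ((32768 : Int) >>> k) = ((2^(15-k) : Nat) : Int) := by
  show ((32768 >>> k : Nat) : Int) = _
  have h32 : (32768 : Nat) = 2^15 := by norm_num
  rw [Nat.shiftRight_eq_div_pow, h32, Nat.pow_div h (by norm_num)]

-- folding A's step over trailing zero bits multiplies the accumulator by 2^n
lemma pad_zeros (n : Nat) : ∀ (m : Nat),
    List.foldl (fun (value : Int) (bit : Int) => PySem.Int.bor (value <<< (1 : Nat)) bit)
      ((m : Nat) : Int) (List.replicate n (0 : Int)) = ((m * 2^n : Nat) : Int) := by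
  induction n with
  | zero => intro m; simp
  | succ n ih =>
    intro m
    rw [List.replicate_succ, List.foldl_cons]
    simp only [stepA_zero]
    rw [ih (2*m)]
    congr 1
    ring

-- the bridge: A's fold over the 0/1 list of l padded to 16 bits, started at ↑m with i bits
-- already consumed, equals B's weighted sum started at ↑m * 2^(16-i) over enumerate l i.
lemma foldAB (l : List Int) : ∀ (i m : Nat), i + l.length ≤ 16 →
    List.foldl (fun (value : Int) (bit : Int) => PySem.Int.bor (value <<< (1 : Nat)) bit)
      ((m : Nat) : Int)
      (l.map (fun x => if x ≠ 0 then (1:Int) else 0) ++ List.replicate (16 - (i + l.length)) 0)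
    = List.foldl (fun (acc : Int) (p : Int × Int) =>
          if p.2 ≠ 0 then acc + ((32768 : Int) >>> p.1.toNat) else acc)
        (((m : Nat) : Int) * 2^(16 - i)) (PySem.List.enumerate l ((i : Nat) : Int)) := by
  induction l with
  | nil =>
    intro i m _
    simp only [List.map_nil, List.nil_append, PySem.List.enumerate_nil, List.foldl_nil,
      List.length_nil, Nat.add_zero]
    rw [pad_zeros]
    push_cast; ring
  | cons b t ih =>
    intro i m h
    have h15 : i ≤ 15 := by simp at h; omega
    rw [List.map_cons, List.cons_append, List.foldl_cons,
        PySem.List.enumerate_cons, List.foldl_cons]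
    simp only [stepA_cast]
    have harg : (16 : Nat) - (i + (b :: t).length) = 16 - ((i+1) + t.length) := by
      simp; omega
    rw [harg]
    have hih := ih (i+1) (2*m + (if b ≠ 0 then 1 else 0)) (by simp at h ⊢; omega)
    push_cast at hih ⊢
    rw [hih]
    congr 1
    by_cases hb : b = 0
    · simp only [hb, ne_eq, not_true_eq_false, if_false]
      have e : 16 - i = (16 - (i+1)) + 1 := by omega
      simp only [e]; push_cast; ring
    · simp only [ne_eq, hb, not_false_eq_true, if_true]
      rw [Int.toNat_natCast, shift_weight i h15]
      have e : 16 - i = (15 - i) + 1 := by omega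
      simp only [e]; push_cast; ring

-- ===== VERDICT (by name: the statement is the Claim_ definition above) =====
theorem arr_to_16bits_spec : Claim_equal_arr_to_16bits := by
  intro arr _
  unfold Spec_arr_to_16bits arr_to_16bits arr_to_16bits_alt
  have hsl : PySem.List.slice arr none (some 16) = arr.take 16 := by
    rw [PySem.List.slice_to arr (b := 16) (by norm_num)]
    rfl
  set l := arr.take 16 with hl
  have hlen : l.length ≤ 16 := by simp [hl]
  have hbits :
      (if (l.map (fun x => if x ≠ 0 then (1:Int) else 0)).length < 16 then
         l.map (fun x => if x ≠ 0 then (1:Int) else 0) ++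
           List.replicate (16 - (l.map (fun x => if x ≠ 0 then (1:Int) else 0)).length) 0
       else l.map (fun x => if x ≠ 0 then (1:Int) else 0))
      = l.map (fun x => if x ≠ 0 then (1:Int) else 0) ++ List.replicate (16 - l.length) 0 := by
    simp only [List.length_map]
    split_ifs with hlt
    · rfl
    · have : 16 - l.length = 0 := by omega
      rw [this, List.replicate_zero, List.append_nil]
  simp only [hsl]
  rw [hbits]
  have := foldAB l 0 0 (by simpa using hlen)
  simpa using this
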